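-- pv_equiv track=rewrite | github.com/borjasotomayor/advent-of-code | 2024/day05.py | is_correct_update
-- ===== SOURCE A (Python) =====
-- def is_correct_update(pages: list[int], deps_dict: dict[int, set[int]]) -> tuple[bool, int | None]:
--     """
--     Checks if an update is correct. If not, it returns False and
--     the index of the offending page (which will come in handy
--     for Part 2)
--     """
--     printed: set[int] = set()
--     for i, page in enumerate(pages):
--         # Given a page P, if any of the pages that
--         # must appear after it have already been
--         # printed, then this is an incorrect update.
--         must_appear_after = deps_dict.get(page, set())
--         if not must_appear_after.isdisjoint(printed):
--             return False, i
--         printed.add(page)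
--
--     return True, None
-- ===== SOURCE B (Python) =====
-- def is_correct_update(pages: list[int], deps_dict: dict[int, set[int]]) -> tuple[bool, int | None]:
--     """
--     Same check via an inverted index: rev[q] is the set of pages p whose
--     dependency set contains q.  Once q is printed, every such p is forbidden
--     from appearing later, so we scan once maintaining a forbidden frontier (each rev entry is merged once, via pop).
--     """
--     rev: dict[int, set[int]] = {}
--     for p, deps in deps_dict.items():
--         for q in deps:
--             rev.setdefault(q, set()).add(p)
--
--     forbidden: set[int] = set()
--     for i, page in enumerate(pages):
--         if page in forbidden:
--             return False, i
--         forbidden |= rev.pop(page, set())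
--     return True, None
-- ===== Notes on version B (the rewrite author's own statement) =====
-- stated objective: alternative
-- what changed: Instead of testing each page's dependency set for disjointness against the growing printed set, B builds an inverted index rev (rev[q] = pages whose dependencies contain q) once and scans pages maintaining a 'forbidden' frontier, failing at the first forbidden page.
import Mathlib
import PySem

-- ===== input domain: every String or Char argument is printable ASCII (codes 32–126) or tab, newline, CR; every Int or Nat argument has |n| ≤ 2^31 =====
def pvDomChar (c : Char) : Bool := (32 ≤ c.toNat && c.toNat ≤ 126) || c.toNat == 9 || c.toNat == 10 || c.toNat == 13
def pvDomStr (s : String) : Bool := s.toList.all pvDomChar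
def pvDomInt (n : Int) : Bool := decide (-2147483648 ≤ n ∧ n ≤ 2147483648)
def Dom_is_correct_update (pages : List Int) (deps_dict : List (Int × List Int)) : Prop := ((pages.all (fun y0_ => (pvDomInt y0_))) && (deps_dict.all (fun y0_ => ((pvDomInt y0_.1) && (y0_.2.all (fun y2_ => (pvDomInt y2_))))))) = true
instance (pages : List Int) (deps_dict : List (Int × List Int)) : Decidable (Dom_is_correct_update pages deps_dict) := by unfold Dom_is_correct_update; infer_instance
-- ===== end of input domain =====

-- B replaces the per-page disjointness test against each page's dependency set by a single
-- forward scan over an inverted index (a 'forbidden' frontier); same cost class, different structure.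

-- ===== PORT A =====
-- the loop 'for i, page in enumerate(pages)': printed grows by add, returns (False, i) on violation
def pvAGo (deps_dict : List (Int × List Int)) : List Int → Int → PySem.Set Int → Bool × Option Int
  | [], _, _ => (true, none)
  | page :: rest, i, printed =>
    let must_appear_after : PySem.Set Int := (PySem.Dict.mk deps_dict).getD page []
    if ¬ (PySem.Set.isdisjoint must_appear_after printed = true) then (false, some i)
    else pvAGo deps_dict rest (i + 1) (PySem.Set.add printed page)

def is_correct_update (pages : List Int) (deps_dict : List (Int × List Int)) : Bool × Option Int :=
  pvAGo deps_dict pages 0 PySem.Set.empty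

-- ===== PORT B =====
-- rev = {}; for p, deps in deps_dict.items(): for q in deps: rev.setdefault(q, set()).add(p)
def pvBuildRev (deps_dict : List (Int × List Int)) : PySem.Dict Int (PySem.Set Int) :=
  deps_dict.foldl
    (fun rev pd => pd.2.foldl (fun rev q => rev.modify q [] (fun s => s.add pd.1)) rev)
    PySem.Dict.empty

-- the scan 'for i, page in enumerate(pages)' maintaining the forbidden frontier;
-- 'forbidden |= rev.pop(page, set())' merges each inverted entry once and removes it
def pvBGo : PySem.Dict Int (PySem.Set Int) → List Int → Int → PySem.Set Int → Bool × Option Int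
  | _, [], _, _ => (true, none)
  | rev, page :: rest, i, forbidden =>
    if PySem.Set.contains forbidden page then (false, some i)
    else
      let (s, rev') := match rev.pop? page with
        | some r => r
        | none => (([] : PySem.Set Int), rev)
      pvBGo rev' rest (i + 1) (PySem.Set.union forbidden s)

def is_correct_update_alt (pages : List Int) (deps_dict : List (Int × List Int)) : Bool × Option Int :=
  pvBGo (pvBuildRev deps_dict) pages 0 PySem.Set.empty

-- ===== PRECONDITION & SPEC =====
-- Pre_ excludes association lists with duplicate keys: those do not encode any Python dict
-- (deps_dict is a dict in Python, whose keys are necessarily distinct).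
def Pre_is_correct_update (pages : List Int) (deps_dict : List (Int × List Int)) : Prop :=
  (deps_dict.map Prod.fst).Nodup

instance (pages : List Int) (deps_dict : List (Int × List Int)) : Decidable (Pre_is_correct_update pages deps_dict) := by
  unfold Pre_is_correct_update; infer_instance

def pvWitness_is_correct_update : List Int × (List (Int × List Int)) := ([1, 2], [(1, [2])])

def Spec_is_correct_update (pages : List Int) (deps_dict : List (Int × List Int)) (out : Bool × Option Int) : Prop := out = is_correct_update_alt pages deps_dict
instance (pages : List Int) (deps_dict : List (Int × List Int)) (out : Bool × Option Int) : Decidable (Spec_is_correct_update pages deps_dict out) := by unfold Spec_is_correct_update; infer_instance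

-- ===== CLAIM (what is proved, stated in full; the proofs are below) =====
def Claim_equal_is_correct_update : Prop := ∀ (pages : List Int) (deps_dict : List (Int × List Int)), Dom_is_correct_update pages deps_dict → Pre_is_correct_update pages deps_dict → Spec_is_correct_update pages deps_dict (is_correct_update pages deps_dict)

-- ===== LEMMAS AND PROOFS =====

-- inner loop of pvBuildRev: adding p under every q of l
lemma pv_mem_inner (l : List Int) (p : Int) (x q : Int) :
    ∀ d : PySem.Dict Int (PySem.Set Int),
      (x ∈ (l.foldl (fun d q => d.modify q [] (fun s => s.add p)) d).getD q []
        ↔ x ∈ d.getD q [] ∨ (x = p ∧ q ∈ l)) := by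
  induction l with
  | nil => intro d; simp
  | cons a l ih =>
    intro d
    simp only [List.foldl_cons, ih, PySem.Dict.getD_modify, List.mem_cons]
    by_cases h : q = a
    · subst h; simp [PySem.Set.mem_add]; tauto
    · simp only [if_neg h]; tauto

-- membership in the inverted index
lemma pv_mem_buildRev (deps_dict : List (Int × List Int)) (x q : Int) :
    x ∈ (pvBuildRev deps_dict).getD q [] ↔ ∃ l, (x, l) ∈ deps_dict ∧ q ∈ l := by
  have main : ∀ (ds : List (Int × List Int)) (d : PySem.Dict Int (PySem.Set Int)),
      (x ∈ (ds.foldl (fun rev pd => pd.2.foldl (fun rev q => rev.modify q [] (fun s => s.add pd.1)) rev) d).getD q []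
        ↔ x ∈ d.getD q [] ∨ ∃ l, (x, l) ∈ ds ∧ q ∈ l) := by
    intro ds
    induction ds with
    | nil => intro d; simp only [List.foldl_nil, List.not_mem_nil, false_and, exists_false, or_false]
    | cons pd ds ih =>
      obtain ⟨p, dl⟩ := pd
      intro d
      simp only [List.foldl_cons, ih, pv_mem_inner, List.mem_cons, Prod.mk.injEq]
      constructor
      · rintro ((h | ⟨rfl, hq⟩) | ⟨l, hl, hq⟩)
        · exact Or.inl h
        · exact Or.inr ⟨dl, Or.inl ⟨rfl, rfl⟩, hq⟩
        · exact Or.inr ⟨l, Or.inr hl, hq⟩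
      · rintro (h | ⟨l, (⟨rfl, rfl⟩ | hl), hq⟩)
        · exact Or.inl (Or.inl h)
        · exact Or.inl (Or.inr ⟨rfl, hq⟩)
        · exact Or.inr ⟨l, hl, hq⟩
  have hempty : (PySem.Dict.empty : PySem.Dict Int (PySem.Set Int)).getD q [] = [] := rfl
  rw [pvBuildRev, main deps_dict PySem.Dict.empty, hempty]
  simp only [List.not_mem_nil, false_or]

-- with distinct keys, first-match lookup agrees with 'some pair matches'
lemma pv_lookup_nodup (deps_dict : List (Int × List Int))
    (hnd : (deps_dict.map Prod.fst).Nodup) (page q : Int) :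
    (∃ l, (page, l) ∈ deps_dict ∧ q ∈ l) ↔ q ∈ (PySem.Dict.mk deps_dict).getD page [] := by
  induction deps_dict with
  | nil => simp [PySem.Dict.getD, PySem.Dict.get?]
  | cons pd ds ih =>
    obtain ⟨p, dl⟩ := pd
    simp only [List.map_cons, List.nodup_cons] at hnd
    by_cases h : p = page
    · subst h
      have hget : (PySem.Dict.mk ((p, dl) :: ds)).getD p [] = dl := by
        simp [PySem.Dict.getD, PySem.Dict.get?_mk_cons]
      rw [hget]
      simp only [List.mem_cons, Prod.mk.injEq]
      constructor
      · rintro ⟨l, (⟨_, rfl⟩ | hl), hq⟩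
        · exact hq
        · exact absurd (by simpa using List.mem_map_of_mem (f := Prod.fst) hl : p ∈ ds.map Prod.fst) hnd.1
      · intro hq; exact ⟨dl, Or.inl (by simp), hq⟩
    · have hget : (PySem.Dict.mk ((p, dl) :: ds)).getD page [] = (PySem.Dict.mk ds).getD page [] := by
        simp [PySem.Dict.getD, PySem.Dict.get?_mk_cons, h]
      rw [hget, ← ih hnd.2]
      simp only [List.mem_cons, Prod.mk.injEq]
      constructor
      · rintro ⟨l, (⟨h1, _⟩ | hl), hq⟩
        · exact absurd h1.symm h
        · exact ⟨l, hl, hq⟩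
      · rintro ⟨l, hl, hq⟩; exact ⟨l, Or.inr hl, hq⟩

-- get? after erase (no PySem lemma exists for erase; proved from its filter definition)
lemma pv_get?_erase (d : PySem.Dict Int (PySem.Set Int)) (k k' : Int) :
    (d.erase k).get? k' = if k' = k then none else d.get? k' := by
  obtain ⟨items⟩ := d
  induction items with
  | nil => by_cases h : k' = k <;> simp [PySem.Dict.erase, PySem.Dict.get?, h]
  | cons p rest ih =>
    by_cases hp : p.1 = k
    · by_cases h : k' = k
      · simp_all [PySem.Dict.erase, PySem.Dict.get?]
      · have hpk : ¬ p.1 = k' := fun hh => h (hh.symm.trans hp)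
        simp_all [PySem.Dict.erase, PySem.Dict.get?]
    · by_cases hk : p.1 = k'
      · by_cases h : k' = k
        · exact absurd (hk.trans h) hp
        · simp [PySem.Dict.erase, PySem.Dict.get?, hk, h]
      · by_cases h : k' = k <;> simp_all [PySem.Dict.erase, PySem.Dict.get?]

-- main loop: the forbidden frontier decides exactly A's disjointness test; rev holds the not-yet-merged edges
lemma pv_loop_eq (deps_dict : List (Int × List Int))
    (hnd : (deps_dict.map Prod.fst).Nodup) :
    ∀ (rest : List Int) (i : Int) (printed forbidden : PySem.Set Int)
      (rev : PySem.Dict Int (PySem.Set Int)),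
      (∀ x, x ∈ forbidden ↔ ∃ q ∈ printed, ∃ l, (x, l) ∈ deps_dict ∧ q ∈ l) →
      (∀ q x, x ∈ rev.getD q [] ↔ ((∃ l, (x, l) ∈ deps_dict ∧ q ∈ l) ∧ q ∉ printed)) →
      pvAGo deps_dict rest i printed = pvBGo rev rest i forbidden := by
  intro rest
  induction rest with
  | nil => intro i printed forbidden rev _ _; rfl
  | cons page rest ih =>
    intro i printed forbidden rev hinv hrev
    have hcond : (¬ (PySem.Set.isdisjoint ((PySem.Dict.mk deps_dict).getD page [] : PySem.Set Int) printed = true))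
        ↔ PySem.Set.contains forbidden page = true := by
      rw [PySem.Set.contains_iff, hinv, PySem.Set.isdisjoint_iff]
      push Not
      constructor
      · rintro ⟨q, hqm, hqp⟩; exact ⟨q, hqp, (pv_lookup_nodup deps_dict hnd page q).2 hqm⟩
      · rintro ⟨q, hqp, hql⟩; exact ⟨q, (pv_lookup_nodup deps_dict hnd page q).1 hql, hqp⟩
    simp only [pvAGo, pvBGo]
    by_cases hc : PySem.Set.contains forbidden page = true
    · rw [if_pos (hcond.2 hc), if_pos hc]
    · rw [if_neg (fun h => hc (hcond.1 h)), if_neg hc]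
      -- the popped set is rev.getD page [] in both branches of pop?
      have hs : ∀ x : Int,
          (x ∈ (match rev.pop? page with
                  | some r => r
                  | none => (([] : PySem.Set Int), rev)).1
            ↔ x ∈ rev.getD page []) := by
        intro x
        cases hg : rev.get? page <;>
          simp [PySem.Dict.pop?, PySem.Dict.getD, hg]
      have hr : ∀ q : Int,
          ((match rev.pop? page with
              | some r => r
              | none => (([] : PySem.Set Int), rev)).2.getD q []
            = if q = page then ([] : PySem.Set Int) else rev.getD q []) := by
        intro q
        cases hg : rev.get? page with
        | none =>
          by_cases h : q = page <;>
            simp [PySem.Dict.pop?, PySem.Dict.getD, hg, h]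
        | some v =>
          by_cases h : q = page <;>
            simp [PySem.Dict.pop?, PySem.Dict.getD, hg, pv_get?_erase, h]
      apply ih
      · intro x
        rw [PySem.Set.mem_union, hinv, hs x, hrev]
        constructor
        · rintro (⟨q, hqp, hl⟩ | ⟨hl, _⟩)
          · exact ⟨q, (PySem.Set.mem_add printed page q).2 (Or.inl hqp), hl⟩
          · exact ⟨page, (PySem.Set.mem_add printed page page).2 (Or.inr rfl), hl⟩
        · rintro ⟨q, hq, hl⟩
          rcases (PySem.Set.mem_add printed page q).1 hq with h | h
          · exact Or.inl ⟨q, h, hl⟩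
          · by_cases hp : page ∈ printed
            · exact Or.inl ⟨page, hp, h ▸ hl⟩
            · exact Or.inr ⟨h ▸ hl, hp⟩
      · intro q x
        rw [hr q]
        by_cases h : q = page
        · subst h
          simp [PySem.Set.mem_add]
        · rw [if_neg h, hrev]
          constructor
          · rintro ⟨hl, hq⟩
            exact ⟨hl, fun hm => hq ((PySem.Set.mem_add printed page q).1 hm |>.resolve_right h)⟩
          · rintro ⟨hl, hq⟩
            exact ⟨hl, fun hm => hq ((PySem.Set.mem_add printed page q).2 (Or.inl hm))⟩

-- ===== VERDICT (by name: the statement is the Claim_ definition above) =====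
theorem is_correct_update_spec : Claim_equal_is_correct_update := by
  intro pages deps_dict _ hpre
  unfold Spec_is_correct_update is_correct_update is_correct_update_alt
  refine pv_loop_eq deps_dict hpre pages 0 PySem.Set.empty PySem.Set.empty (pvBuildRev deps_dict)
    (by simp [PySem.Set.empty]) ?_
  intro q x
  rw [pv_mem_buildRev]
  simp [PySem.Set.empty]
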